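-- pv_equiv track=rewrite | github.com/JadielTeofilo/General-Algorithms | src/sorting_searching/peaks_and_valleys.py | sorting_peaks_and_valleys
-- ===== SOURCE A (Python) =====
-- from typing import List, Iterable, Tuple
--
-- def sorting_peaks_and_valleys(numbers: List[int]) -> List[int]:
-- 	"""
-- 		Builds a new list of numbers making interchanging
-- 		peaks and valleys,
--
-- 		ex numbers: 8 4 2 3 1
-- 		output: 8 1 4 2 3
-- 	"""
-- 	numbers.sort()
-- 	result: List[int] = []
--
-- 	start: int = 0
-- 	end: int = len(numbers) - 1
-- 	while start < end:
-- 		result.extend([numbers[start], numbers[end]])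
-- 		start += 1
-- 		end -= 1
-- 	if start == end:
-- 		result.append(numbers[start])  # Adds the remaining mid element
--
-- 	return result
-- ===== SOURCE B (Python) =====
-- from typing import List, Iterable, Tuple
--
--
-- def sorting_peaks_and_valleys(numbers: List[int]) -> List[int]:
--     """Split-and-merge formulation: sort in place, split the sorted list at
--     the middle, and interleave the low half with the reversed high half."""
--     numbers.sort()
--     mid = (len(numbers) + 1) // 2
--     lows = numbers[:mid]
--     highs = numbers[mid:][::-1]
--     result = [x for pair in zip(lows, highs) for x in pair]
--     if len(numbers) % 2:
--         result.append(lows[-1])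
--     return result
-- ===== Notes on version B (the rewrite author's own statement) =====
-- stated objective: alternative
-- what changed: Replaces A's two-pointer convergent while loop (extend with numbers[start], numbers[end], moving both indices inward) by a split-and-merge decomposition: sort, split the sorted list at mid=(n+1)//2, reverse the high half, and interleave the two halves with zip, appending the leftover middle element for odd lengths.
import Mathlib
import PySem

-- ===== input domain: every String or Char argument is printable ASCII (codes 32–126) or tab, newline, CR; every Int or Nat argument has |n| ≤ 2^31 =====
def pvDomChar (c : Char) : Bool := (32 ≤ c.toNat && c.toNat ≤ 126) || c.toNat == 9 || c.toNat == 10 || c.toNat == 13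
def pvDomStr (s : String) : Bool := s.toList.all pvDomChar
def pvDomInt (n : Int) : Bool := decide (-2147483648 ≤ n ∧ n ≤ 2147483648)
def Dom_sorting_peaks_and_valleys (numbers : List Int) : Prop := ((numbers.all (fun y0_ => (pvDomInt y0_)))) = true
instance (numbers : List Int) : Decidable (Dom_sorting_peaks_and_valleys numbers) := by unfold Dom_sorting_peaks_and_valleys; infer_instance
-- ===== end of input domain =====

-- B replaces A's two-pointer convergent loop by a split-and-merge decomposition (sort, split at
-- the middle, interleave the low half with the reversed high half); same cost, return value proved equal.
-- Both Pythons sort `numbers` in place (numbers.sort()); the theorems are about the return value.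

-- ===== PORT A =====
-- the while loop: result.extend([numbers[start], numbers[end]]); start += 1; end -= 1
-- (pyGetD's default 0 is a totality guard only: inside the loop both indices are in range)
def pvLoopA (s : List Int) (start en : Int) (acc : List Int) : List Int :=
  if start < en then
    pvLoopA s (start + 1) (en - 1) (acc ++ [PySem.List.pyGetD s start 0, PySem.List.pyGetD s en 0])
  else if start = en then acc ++ [PySem.List.pyGetD s start 0]
  else acc
termination_by (en - start + 1).toNat
decreasing_by omega

def sorting_peaks_and_valleys (numbers : List Int) : List Int :=
  let s := PySem.List.sorted numbers id
  pvLoopA s 0 ((s.length : Int) - 1) []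

-- ===== PORT B =====
def sorting_peaks_and_valleys_alt (numbers : List Int) : List Int :=
  let s := PySem.List.sorted numbers id               -- numbers.sort()
  let mid : Int := PySem.Int.floordiv ((s.length : Int) + 1) 2
  let lows := PySem.List.slice s none (some mid)      -- numbers[:mid]
  let highs := (PySem.List.slice? (PySem.List.slice s (some mid) none) none none (-1)).getD []
                                                      -- numbers[mid:][::-1] (step -1 ≠ 0 never raises)
  let result := (lows.zip highs).flatMap (fun p => [p.1, p.2])
  if s.length % 2 = 1 then result ++ [PySem.List.pyGetD lows (-1) 0] else result
                                                      -- lows[-1]: lows ≠ [] whenever the length is odd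

-- ===== PRECONDITION & SPEC =====
def Spec_sorting_peaks_and_valleys (numbers : List Int) (out : List Int) : Prop := out = sorting_peaks_and_valleys_alt numbers
instance (numbers : List Int) (out : List Int) : Decidable (Spec_sorting_peaks_and_valleys numbers out) := by unfold Spec_sorting_peaks_and_valleys; infer_instance

-- ===== CLAIM (what is proved, stated in full; the proofs are below) =====
def Claim_equal_sorting_peaks_and_valleys : Prop := ∀ (numbers : List Int), Dom_sorting_peaks_and_valleys numbers → Spec_sorting_peaks_and_valleys numbers (sorting_peaks_and_valleys numbers)

-- ===== LEMMAS AND PROOFS =====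

-- Bridge function: peel the head and the last element simultaneously (the value both programs build).
def pvPeel (s : List Int) : List Int :=
  if 2 ≤ s.length then
    s.head! :: s.getLast! :: pvPeel s.tail.dropLast
  else s
termination_by s.length
decreasing_by simp [List.length_dropLast, List.length_tail]; omega

theorem pvPeel_nil : pvPeel [] = [] := by simp [pvPeel]

theorem pvPeel_singleton (a : Int) : pvPeel [a] = [a] := by simp [pvPeel]

theorem pvPeel_cons_concat (a b : Int) (u : List Int) :
    pvPeel (a :: (u ++ [b])) = a :: b :: pvPeel u := by
  rw [pvPeel]
  have h2 : 2 ≤ (a :: (u ++ [b])).length := by simp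
  rw [if_pos h2]
  simp [List.getLast!_eq_getLast?_getD, List.getLast?_cons]

-- the slice the two-pointer loop still has to traverse, decomposed one step
theorem pv_take_drop_decomp (s : List Int) (d t : Nat) (h2 : 2 ≤ t) (hl : d + t ≤ s.length) :
    (s.drop d).take t = s[d]'(by omega) ::
      (((s.drop (d+1)).take (t-2)) ++ [s[d+t-1]'(by omega)]) := by
  have hd : d < s.length := by omega
  rw [List.drop_eq_getElem_cons hd]
  have ht : t = (t - 2) + 1 + 1 := by omega
  conv_lhs => rw [ht]
  rw [List.take_succ_cons, List.take_add_one]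
  have hidx : d + 1 + (t - 2) = d + t - 1 := by omega
  have hget : (s.drop (d+1))[t-2]? = some (s[d+t-1]'(by omega)) := by
    rw [List.getElem?_drop, List.getElem?_eq_getElem (by omega)]
    simp [hidx]
  simp [hget]

-- A's loop computes pvPeel of the slice between the two pointers
theorem pvLoopA_eq_peel (k : Nat) : ∀ (s : List Int) (st en : Int) (acc : List Int),
    0 ≤ st → en < (s.length : Int) → (en + 1 - st).toNat = k →
    pvLoopA s st en acc = acc ++ pvPeel ((s.drop st.toNat).take (en + 1 - st).toNat) := by
  induction k using Nat.strong_induction_on with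
  | _ k IH =>
    intro s st en acc h0 hlen hk
    rw [pvLoopA]
    by_cases hlt : st < en
    · rw [if_pos hlt]
      have hen0 : 0 ≤ en := by omega
      have hd : st.toNat + (en + 1 - st).toNat ≤ s.length := by omega
      have ht2 : 2 ≤ (en + 1 - st).toNat := by omega
      rw [IH ((en - 1) + 1 - (st + 1)).toNat (by omega) s (st+1) (en-1) _ (by omega) (by omega) rfl]
      rw [pv_take_drop_decomp s st.toNat (en + 1 - st).toNat ht2 hd]
      rw [pvPeel_cons_concat]
      have e1 : (st + 1).toNat = st.toNat + 1 := by omega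
      have e2 : (en - (st + 1)).toNat = (en + 1 - st).toNat - 2 := by omega
      have e3 : st.toNat + (en + 1 - st).toNat - 1 = en.toNat := by omega
      have g1 : PySem.List.pyGetD s st 0 = s[st.toNat]'(by omega) :=
        PySem.List.pyGetD_eq_getElem s 0 h0 (by omega)
      have g2 : PySem.List.pyGetD s en 0 = s[en.toNat]'(by omega) :=
        PySem.List.pyGetD_eq_getElem s 0 hen0 (by omega)
      simp [e1, e2, e3, g1, g2]
    · rw [if_neg hlt]
      by_cases heq : st = en
      · rw [if_pos heq]
        subst heq
        have ht1 : (st + 1 - st).toNat = 1 := by omega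
        rw [ht1]
        have hd : st.toNat < s.length := by omega
        have g1 : PySem.List.pyGetD s st 0 = s[st.toNat]'hd :=
          PySem.List.pyGetD_eq_getElem s 0 h0 (by omega)
        have ht : List.take 1 (List.drop st.toNat s) = [s[st.toNat]'hd] := by
          rw [List.take_one, List.head?_drop, List.getElem?_eq_getElem hd]
          rfl
        rw [ht, pvPeel_singleton, g1]
      · rw [if_neg heq]
        have ht0 : (en + 1 - st).toNat = 0 := by omega
        rw [ht0]
        simp [pvPeel_nil]

-- B's body in Nat terms (slices resolved to take/drop)
def pvNatCore (s : List Int) : List Int :=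
  let m := (s.length + 1) / 2
  let lows := s.take m
  let r := (lows.zip ((s.drop m).reverse)).flatMap (fun p => [p.1, p.2])
  if s.length % 2 = 1 then r ++ [lows.getLastD 0] else r

theorem pvAlt_eq_natCore (numbers : List Int) :
    sorting_peaks_and_valleys_alt numbers = pvNatCore (PySem.List.sorted numbers id) := by
  unfold sorting_peaks_and_valleys_alt
  set s := PySem.List.sorted numbers id with hs
  have hm : PySem.Int.floordiv ((s.length : Int) + 1) 2 = (((s.length + 1) / 2 : Nat) : Int) := by
    simp [PySem.Int.floordiv, Int.fdiv_eq_ediv]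
  simp only [hm, PySem.List.slice_to_natCast, PySem.List.slice_from_natCast,
    PySem.List.slice?_none_none_neg_one, Option.getD_some, pvNatCore]
  by_cases hodd : s.length % 2 = 1
  · rw [if_pos hodd, if_pos hodd]
    have hne : s.take ((s.length + 1) / 2) ≠ [] := by
      intro h
      apply_fun List.length at h
      rw [List.length_take, List.length_nil] at h
      omega
    rw [PySem.List.pyGetD_neg_one _ _ hne]
    rw [List.getLastD_eq_getLast?, List.getLast?_eq_some_getLast hne]
    rfl
  · rw [if_neg hodd, if_neg hodd]

theorem pvNatCore_cons_concat (a b : Int) (u : List Int) :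
    pvNatCore (a :: (u ++ [b])) = a :: b :: pvNatCore u := by
  simp only [pvNatCore]
  have hlen : (a :: (u ++ [b])).length = u.length + 2 := by simp
  set m' := (u.length + 1) / 2 with hm'
  have hmle : m' - u.length = 0 := by omega
  have hm : ((a :: (u ++ [b])).length + 1) / 2 = m' + 1 := by rw [hlen]; omega
  rw [hm]
  have htake : (a :: (u ++ [b])).take (m' + 1) = a :: u.take m' := by
    rw [List.take_succ_cons, List.take_append, hmle]
    simp
  have hdrop : (a :: (u ++ [b])).drop (m' + 1) = u.drop m' ++ [b] := by
    rw [List.drop_succ_cons, List.drop_append, hmle]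
    simp
  rw [htake, hdrop]
  simp only [List.reverse_append, List.reverse_cons, List.reverse_nil, List.nil_append,
    List.singleton_append, List.zip_cons_cons, List.flatMap_cons]
  rw [show (a :: (u ++ [b])).length % 2 = u.length % 2 by rw [hlen, Nat.add_mod_right]]
  by_cases hodd : u.length % 2 = 1
  · rw [if_pos hodd, if_pos hodd]
    have hne : u.take m' ≠ [] := by
      intro h
      apply_fun List.length at h
      rw [List.length_take, List.length_nil] at h
      omega
    have hg : (a :: u.take m').getLastD 0 = (u.take m').getLastD 0 := by
      rw [List.getLastD_cons, List.getLastD_eq_getLast?, List.getLastD_eq_getLast?,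
        List.getLast?_eq_some_getLast hne]
      simp
    rw [hg]
    simp
  · rw [if_neg hodd, if_neg hodd]
    simp

theorem pvNatCore_eq_peel (s : List Int) : pvNatCore s = pvPeel s := by
  induction hn : s.length using Nat.strong_induction_on generalizing s with
  | _ n IH =>
    match s with
    | [] => simp [pvNatCore, pvPeel_nil]
    | [a] => simp [pvNatCore, pvPeel_singleton]
    | a :: c :: t =>
      obtain ⟨u, b, hub⟩ : ∃ u bb, c :: t = u ++ [bb] := by
        rcases (c :: t).eq_nil_or_concat with h | ⟨u, bb, h⟩
        · simp at h
        · exact ⟨u, bb, by simpa [List.concat_eq_append] using h⟩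
      have hlt : u.length < n := by
        have h1 : (c :: t).length = u.length + 1 := by rw [hub]; simp
        have h2 : (a :: c :: t).length = n := hn
        simp at h1 h2
        omega
      rw [show a :: c :: t = a :: (u ++ [b]) by rw [← hub]]
      rw [pvNatCore_cons_concat, pvPeel_cons_concat, IH u.length hlt u rfl]

-- ===== VERDICT (by name: the statement is the Claim_ definition above) =====
theorem sorting_peaks_and_valleys_spec : Claim_equal_sorting_peaks_and_valleys := by
  intro numbers _
  unfold Spec_sorting_peaks_and_valleys
  rw [pvAlt_eq_natCore, pvNatCore_eq_peel]
  unfold sorting_peaks_and_valleys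
  set s := PySem.List.sorted numbers id with hs
  rw [pvLoopA_eq_peel ((s.length : Int) - 1 + 1 - 0).toNat s 0 ((s.length : Int) - 1) [] (by omega) (by omega) rfl]
  simp
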